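-- pv_equiv track=rewrite | github.com/cmcghan/tulip-rss | misc_testing/tower_of_hanoi3.py | isAbleToMove
-- ===== SOURCE A (Python) =====
-- def isAbleToMove(state,pl):
--     # first, find the plate we are moving
--     checkindex = findPlateBySize(state,pl)
--     if (checkindex is None): # if plate doesn't exist, stop (error)
--         return False
--     locA = state[checkindex][1]
--     # make sure nothing is above us (plate must be clear overhead)
--     for i in range(len(state)):
--         if (i != checkindex): # skip plate that is moving
--             plateInfo = state[i]
--             loc = plateInfo[1]
--             if (locA[0] == loc[0]): # if other-plate on same spire-rod
--                 if (locA[1] > loc[1]): # and if lower than other-plate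
--                     return False
--     return True
--
-- def findPlateBySize(state,pl):
--     # first, find the plate we are moving
--     checkindex = None
--     for i in range(len(state)):
--         plateInfo = state[i]
--         if (pl == plateInfo[0]):
--             checkindex = i
--             break
--     return checkindex
-- ===== SOURCE B (Python) =====
-- def isAbleToMove(state, pl):
--     # single pass: track min height per rod in a dict while spotting the moving plate;
--     # the plate is movable iff its height equals the minimum height on its rod
--     min_h = {}
--     found = None
--     for size, (rod, h) in state:
--         if found is None and size == pl:
--             found = (rod, h)
--         if rod not in min_h or h < min_h[rod]:
--             min_h[rod] = h
--     if found is None: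
--         return False
--     rod, h = found
--     return h == min_h[rod]
-- ===== Notes on version B (the rewrite author's own statement) =====
-- stated objective: alternative
-- what changed: Instead of locating the plate and then scanning the other plates on its rod for one strictly below it, B makes a single pass that builds a dict of the minimum height per rod (while spotting the moving plate) and decides movability by the equality test 'plate height == minimum height on its rod'.
import Mathlib
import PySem

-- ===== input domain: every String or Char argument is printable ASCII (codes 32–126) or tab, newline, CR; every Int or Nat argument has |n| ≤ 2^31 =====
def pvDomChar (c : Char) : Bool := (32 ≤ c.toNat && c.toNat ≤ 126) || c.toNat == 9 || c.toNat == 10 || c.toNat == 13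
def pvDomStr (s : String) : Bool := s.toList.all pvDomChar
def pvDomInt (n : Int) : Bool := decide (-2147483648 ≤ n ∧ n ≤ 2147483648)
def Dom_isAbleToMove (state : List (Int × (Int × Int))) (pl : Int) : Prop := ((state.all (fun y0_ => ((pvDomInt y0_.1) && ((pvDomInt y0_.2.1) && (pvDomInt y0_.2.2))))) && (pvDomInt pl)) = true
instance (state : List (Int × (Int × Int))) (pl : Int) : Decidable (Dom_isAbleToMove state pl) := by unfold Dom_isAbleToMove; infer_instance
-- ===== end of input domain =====

-- B replaces A's find-then-scan-the-others check by one grouping pass: a dict of the minimum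
-- height per rod, then 'plate height == minimum on its rod'; alternative algorithm, same cost.

-- ===== PORT A =====
-- findPlateBySize: scan with an index counter, first plate whose size equals pl
def findPlateBySize (state : List (Int × (Int × Int))) (pl : Int) : Option Int :=
  findPlateAux state pl 0
where
  findPlateAux : List (Int × (Int × Int)) → Int → Int → Option Int
  | [], _, _ => none
  | p :: rest, pl, i => if pl == p.1 then some i else findPlateAux rest pl (i + 1)

-- the for-loop over range(len(state)) with early return False
def checkAux (ci : Int) (locA : Int × Int) : List (Int × (Int × Int)) → Int → Bool
  | [], _ => true
  | p :: rest, i =>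
    if i ≠ ci then
      if locA.1 == p.2.1 then
        if locA.2 > p.2.2 then false
        else checkAux ci locA rest (i + 1)
      else checkAux ci locA rest (i + 1)
    else checkAux ci locA rest (i + 1)

def isAbleToMove (state : List (Int × (Int × Int))) (pl : Int) : Bool :=
  match findPlateBySize state pl with
  | none => false
  | some ci =>
    match PySem.List.pyGet? state ci with
    | none => false  -- unreachable: ci is a valid index produced by findPlateBySize
    | some p => checkAux ci p.2 state 0

-- ===== PORT B =====
-- one step of Source B's loop body, acting on the pair (min_h dict, found)
def altStep (pl : Int) (acc : PySem.Dict Int Int × Option (Int × Int)) (p : Int × (Int × Int)) :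
    PySem.Dict Int Int × Option (Int × Int) :=
  let found := match acc.2 with
    | none => if p.1 == pl then some p.2 else none
    | some x => some x
  let d := match acc.1.get? p.2.1 with
    | none => acc.1.insert p.2.1 p.2.2            -- rod not in min_h
    | some m => if p.2.2 < m then acc.1.insert p.2.1 p.2.2 else acc.1
  (d, found)

def isAbleToMove_alt (state : List (Int × (Int × Int))) (pl : Int) : Bool :=
  let acc := state.foldl (altStep pl) (PySem.Dict.empty, none)
  match acc.2 with
  | none => false
  | some (rod, h) =>
    match acc.1.get? rod with
    | none => false  -- unreachable: the found plate's own rod was inserted (Python never hits KeyError)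
    | some m => h == m

-- ===== PRECONDITION & SPEC =====
def Spec_isAbleToMove (state : List (Int × (Int × Int))) (pl : Int) (out : Bool) : Prop := out = isAbleToMove_alt state pl
instance (state : List (Int × (Int × Int))) (pl : Int) (out : Bool) : Decidable (Spec_isAbleToMove state pl out) := by unfold Spec_isAbleToMove; infer_instance

-- ===== CLAIM (what is proved, stated in full; the proofs are below) =====
def Claim_equal_isAbleToMove : Prop := ∀ (state : List (Int × (Int × Int))) (pl : Int), Dom_isAbleToMove state pl → Spec_isAbleToMove state pl (isAbleToMove state pl)

-- ===== LEMMAS AND PROOFS =====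

-- the fold's two components are independent
theorem foldl_altStep_split (pl : Int) (l : List (Int × (Int × Int)))
    (d : PySem.Dict Int Int) (f : Option (Int × Int)) :
    l.foldl (altStep pl) (d, f)
      = (l.foldl (fun d p => match d.get? p.2.1 with
            | none => d.insert p.2.1 p.2.2
            | some m => if p.2.2 < m then d.insert p.2.1 p.2.2 else d) d,
         l.foldl (fun f p => match f with
            | none => if p.1 == pl then some p.2 else none
            | some x => some x) f) := by
  induction l generalizing d f with
  | nil => rfl
  | cons a t ih => simp only [List.foldl_cons, altStep]; exact ih _ _

-- the fold keeps an already-found plate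
theorem foldl_found_keep (pl : Int) (t : List (Int × (Int × Int))) (x : Int × Int) :
    t.foldl (fun f p => match f with
        | none => if p.1 == pl then some p.2 else none
        | some x => some x) (some x) = some x := by
  induction t with
  | nil => rfl
  | cons b t ih => exact ih

-- the found-component is the first size match
theorem foldl_found (pl : Int) (l : List (Int × (Int × Int))) :
    l.foldl (fun f p => match f with
        | none => if p.1 == pl then some p.2 else none
        | some x => some x) none
      = (l.find? (fun p => p.1 == pl)).map Prod.snd := by
  induction l with
  | nil => rfl
  | cons a t ih =>
    rcases hb : (a.1 == pl) with _ | _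
    · simp only [List.foldl_cons, List.find?_cons, hb]
      exact ih
    · simp only [List.foldl_cons, List.find?_cons, hb]
      exact foldl_found_keep pl t a.2

-- the dict-component's lookup at r is the running minimum of the heights on rod r
theorem foldl_dict_get (l : List (Int × (Int × Int))) (r : Int) :
    ∀ (d : PySem.Dict Int Int),
    (l.foldl (fun d p => match d.get? p.2.1 with
        | none => d.insert p.2.1 p.2.2
        | some m => if p.2.2 < m then d.insert p.2.1 p.2.2 else d) d).get? r
      = ((l.filter (fun p => p.2.1 == r)).map (fun p => p.2.2)).foldl
          (fun o h => some (min (o.getD h) h)) (d.get? r) := by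
  induction l with
  | nil => intro d; rfl
  | cons a t ih =>
    intro d
    by_cases hr : a.2.1 = r
    · have hb : (a.2.1 == r) = true := by simp [hr]
      simp only [List.filter_cons, hb, if_true, List.map_cons, List.foldl_cons]
      rcases hget : d.get? a.2.1 with _ | m
      · simp only [hget]
        rw [ih, PySem.Dict.get?_insert, if_pos hr.symm]
        rw [hr] at hget
        rw [hget]
        simp
      · simp only [hget]
        rw [hr] at hget
        by_cases hlt : a.2.2 < m
        · rw [if_pos hlt, ih, PySem.Dict.get?_insert, if_pos hr.symm, hget]
          simp [min_eq_right (le_of_lt hlt)]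
        · rw [if_neg hlt, ih, hget]
          simp [min_eq_left (by omega : m ≤ a.2.2)]
    · have hb : (a.2.1 == r) = false := by simp [hr]
      simp only [List.filter_cons, hb, Bool.false_eq_true, if_false, List.foldl_cons]
      rcases hget : d.get? a.2.1 with _ | m
      · simp only [hget]
        rw [ih, PySem.Dict.get?_insert, if_neg (Ne.symm hr)]
      · simp only [hget]
        by_cases hlt : a.2.2 < m
        · rw [if_pos hlt, ih, PySem.Dict.get?_insert, if_neg (Ne.symm hr)]
        · rw [if_neg hlt, ih]

-- the option-min fold from a some-start is a plain foldl min
theorem foldl_omin_some (ml : List Int) : ∀ (m0 : Int),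
    ml.foldl (fun o h => some (min (o.getD h) h)) (some m0) = some (ml.foldl min m0) := by
  induction ml with
  | nil => intro _; rfl
  | cons a t ih => intro m0; simpa using ih (min m0 a)

theorem le_foldl_min_iff (h x : Int) (t : List Int) :
    h ≤ t.foldl min x ↔ (h ≤ x ∧ ∀ y ∈ t, h ≤ y) := by
  induction t generalizing x with
  | nil => simp
  | cons a t ih =>
    simp only [List.foldl_cons, ih, le_min_iff, List.mem_cons]
    constructor
    · rintro ⟨⟨hx, ha⟩, hall⟩
      refine ⟨hx, ?_⟩
      rintro y (rfl | hy)
      · exact ha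
      · exact hall y hy
    · rintro ⟨hx, hall⟩
      exact ⟨⟨hx, hall a (Or.inl rfl)⟩, fun y hy => hall y (Or.inr hy)⟩

theorem foldl_min_le_start (t : List Int) : ∀ (x : Int), t.foldl min x ≤ x := by
  induction t with
  | nil => intro x; exact le_refl x
  | cons a t ih => intro x; exact le_trans (ih (min x a)) (min_le_left _ _)

theorem foldl_min_le_of_mem (t : List Int) : ∀ (x y : Int), (y = x ∨ y ∈ t) → t.foldl min x ≤ y := by
  induction t with
  | nil =>
    intro x y hy
    rcases hy with h | h
    · simp [h]
    · cases h
  | cons a t ih =>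
    intro x y hy
    rcases hy with h | h
    · rw [List.foldl_cons, h]
      exact le_trans (foldl_min_le_start t (min x a)) (min_le_left _ _)
    · rcases List.mem_cons.mp h with h' | h'
      · rw [List.foldl_cons, h']
        exact le_trans (foldl_min_le_start t (min x a)) (min_le_right _ _)
      · rw [List.foldl_cons]
        exact ih (min x a) y (Or.inr h')

-- A's find helper returns the index of List.find?'s witness, and pyGet? there returns it
theorem fp_none (l : List (Int × (Int × Int))) (pl : Int)
    (h : l.find? (fun p => p.1 == pl) = none) :
    ∀ i, findPlateBySize.findPlateAux l pl i = none := by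
  induction l with
  | nil => intro i; rfl
  | cons a t ih =>
    intro i
    rcases hb : (a.1 == pl) with _ | _
    · simp only [List.find?_cons, hb] at h
      have hb2 : (pl == a.1) = false := by
        rw [beq_eq_false_iff_ne] at hb ⊢; exact Ne.symm hb
      simp only [findPlateBySize.findPlateAux, hb2, if_false]
      exact ih h (i + 1)
    · simp only [List.find?_cons, hb] at h; cases h

theorem fp_some (l : List (Int × (Int × Int))) (pl : Int) (q : Int × (Int × Int))
    (h : l.find? (fun p => p.1 == pl) = some q) :
    ∃ ci : Int, findPlateBySize l pl = some ci ∧ PySem.List.pyGet? l ci = some q := by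
  suffices H : ∀ (i : Nat), ∃ k : Nat,
      findPlateBySize.findPlateAux l pl (i : Int) = some ((i + k : Nat) : Int) ∧ l[k]? = some q by
    obtain ⟨k, h1, h2⟩ := H 0
    refine ⟨(k : Int), by simpa using h1, ?_⟩
    rw [PySem.List.pyGet?_natCast]; exact h2
  induction l with
  | nil => cases h
  | cons a t ih =>
    intro i
    rcases hb : (a.1 == pl) with _ | _
    · simp only [List.find?_cons, hb] at h
      have hb2 : (pl == a.1) = false := by
        rw [beq_eq_false_iff_ne] at hb ⊢; exact Ne.symm hb
      obtain ⟨k, h1, h2⟩ := ih h (i + 1)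
      refine ⟨k + 1, ?_, by simpa using h2⟩
      simp only [findPlateBySize.findPlateAux, hb2, if_false]
      rw [show ((i : Int) + 1) = ((i + 1 : Nat) : Int) by push_cast; rfl, h1]
      have hk : i + 1 + k = i + (k + 1) := by omega
      rw [hk]
      simp
    · simp only [List.find?_cons, hb] at h
      injection h with h'
      subst h'
      refine ⟨0, ?_, rfl⟩
      have hb2 : (pl == a.1) = true := by
        rw [beq_iff_eq] at hb ⊢; exact hb.symm
      simp [findPlateBySize.findPlateAux, hb2]

-- A's loop is an 'all' over the enumeration
theorem checkAux_all (ci : Int) (locA : Int × Int) (l : List (Int × (Int × Int))) : ∀ (i : Int),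
    checkAux ci locA l i
      = (PySem.List.enumerate l i).all
          (fun iq => iq.1 == ci || !(locA.1 == iq.2.2.1) || decide (locA.2 ≤ iq.2.2.2)) := by
  induction l with
  | nil => intro i; simp [checkAux, PySem.List.enumerate_nil]
  | cons p rest ih =>
    intro i
    rw [PySem.List.enumerate_cons]
    simp only [checkAux, List.all_cons]
    by_cases h1 : i = ci
    · simp [h1, ih]
    · by_cases h2 : locA.1 = p.2.1
      · by_cases h3 : locA.2 > p.2.2
        · simp [h1, h2, h3, show ¬(locA.2 ≤ p.2.2) by omega]
        · simp [h1, h2, show locA.2 ≤ p.2.2 by omega, ih]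
      · simp [h1, h2, ih]

-- ===== VERDICT (by name: the statement is the Claim_ definition above) =====
theorem isAbleToMove_spec : Claim_equal_isAbleToMove := by
  intro state pl _
  unfold Spec_isAbleToMove isAbleToMove isAbleToMove_alt
  rw [foldl_altStep_split, foldl_found]
  rcases hfind : state.find? (fun p => p.1 == pl) with _ | q
  · -- no such plate: both return false
    have hA : findPlateBySize state pl = none := by
      unfold findPlateBySize; exact fp_none state pl hfind 0
    simp [hA, hfind]
  · obtain ⟨ci, hci, hget⟩ := fp_some state pl q hfind
    simp only [hci, hget, hfind, Option.map_some]
    -- B side: the dict lookup at q.2.1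
    rw [foldl_dict_get, PySem.Dict.get?_empty]
    have hqmem : q ∈ state := List.mem_of_find?_eq_some hfind
    have hq_in_group : q.2.2 ∈ (state.filter (fun p => p.2.1 == q.2.1)).map (fun p => p.2.2) := by
      exact List.mem_map_of_mem (List.mem_filter.mpr ⟨hqmem, by simp⟩)
    rcases hgl : (state.filter (fun p => p.2.1 == q.2.1)).map (fun p => p.2.2) with _ | ⟨m0, mt⟩
    · rw [hgl] at hq_in_group; cases hq_in_group
    · rw [hgl, List.foldl_cons]
      simp only [Option.getD_none]
      rw [show min m0 m0 = m0 by simp, foldl_omin_some]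
      -- now: checkAux = (q.2.2 == foldl min m0 mt)
      rw [checkAux_all]
      show ((PySem.List.enumerate state 0).all fun iq =>
          iq.1 == ci || !(q.2.1 == iq.2.2.1) || decide (q.2.2 ≤ iq.2.2.2))
        = (q.2.2 == List.foldl min m0 mt)
      rcases Classical.em (∀ y, (y = m0 ∨ y ∈ mt) → q.2.2 ≤ y) with hall | hnall
      · have hminle : mt.foldl min m0 ≤ q.2.2 := by
          apply foldl_min_le_of_mem
          rw [hgl] at hq_in_group
          simpa using hq_in_group
        have hle : q.2.2 ≤ mt.foldl min m0 :=
          (le_foldl_min_iff _ _ _).mpr ⟨hall m0 (Or.inl rfl), fun y hy => hall y (Or.inr hy)⟩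
        have heq : q.2.2 = mt.foldl min m0 := le_antisymm hle hminle
        rw [show (q.2.2 == mt.foldl min m0) = true by simp [heq]]
        rw [List.all_eq_true]
        intro iq hiq
        rcases Decidable.em (iq.1 = ci) with h1 | h1
        · simp [h1]
        · rcases Decidable.em (q.2.1 = iq.2.2.1) with h2 | h2
          · have : iq.2.2.2 ∈ (state.filter (fun p => p.2.1 == q.2.1)).map (fun p => p.2.2) := by
              apply List.mem_map_of_mem
              apply List.mem_filter.mpr
              refine ⟨?_, by simp [h2.symm]⟩
              rw [PySem.List.mem_enumerate_iff] at hiq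
              obtain ⟨k, hk, hkeq⟩ := hiq
              have : iq.2 = state[k] := by cases hkeq; rfl
              rw [this]; exact List.getElem_mem hk
            rw [hgl] at this
            have hle2 : q.2.2 ≤ iq.2.2.2 := hall iq.2.2.2 (by simpa using this)
            simp [hle2]
          · simp [h2]
      · -- some plate on the rod is strictly below: both sides false
        push_neg at hnall
        obtain ⟨y, hy, hylt⟩ := hnall
        have hymem : y ∈ (state.filter (fun p => p.2.1 == q.2.1)).map (fun p => p.2.2) := by
          rw [hgl]; simpa using hy
        -- B side false
        have hminy : mt.foldl min m0 ≤ y := foldl_min_le_of_mem mt m0 y hy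
        have hne : (q.2.2 == mt.foldl min m0) = false := by
          rw [beq_eq_false_iff_ne]; intro hc; omega
        rw [hne]
        -- A side false: find the witness plate in the enumeration, distinct from ci
        obtain ⟨p0, hp0f, hp0v⟩ := List.mem_map.mp hymem
        have hp0 := List.mem_filter.mp hp0f
        obtain ⟨k, hk, hkget⟩ := List.getElem_of_mem hp0.1
        -- the plate at index ci is q, with height q.2.2 > y, so k ≠ ci as indices
        have hkne : (k : Int) ≠ ci := by
          intro hc
          have : PySem.List.pyGet? state (k : Int) = some p0 := by
            rw [PySem.List.pyGet?_natCast]; simp [hk, hkget]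
          rw [hc, hget] at this
          have : q = p0 := by injection this
          rw [← this] at hp0v
          omega
        rw [List.all_eq_false]
        refine ⟨((k : Int), p0), ?_, ?_⟩
        · rw [PySem.List.mem_enumerate_iff]
          exact ⟨k, hk, by simp [hkget]⟩
        · have hrod : (q.2.1 == p0.2.1) = true := by
            have := hp0.2; simp only [beq_iff_eq] at this; simp [this]
          simp only [Bool.not_eq_true, Bool.or_eq_false_iff]
          refine ⟨⟨by simp [hkne], by simp [hrod]⟩, by simp [hp0v]; omega⟩
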